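-- pv_equiv track=rewrite | github.com/mathew-j-davis/shuttle | 1_deployment/shared_library/shuttle_common/files.py | is_name_safe
-- ===== SOURCE A (Python) =====
-- def is_name_safe(name, is_path = False):
--     """
--     Check if a filename contains potentially dangerous characters.
--     Allows alphanumeric, spaces, and valid UTF-8 characters, but blocks
--     control characters and specific dangerous symbols.
--
--     Args:
--         filename (str): Filename to check
--
--     Returns:
--         bool: True if filename is safe, False otherwise
--     """
--     # Block control characters (0x00-0x1F, 0x7F)
--     if any(ord(char) < 32 or ord(char) == 0x7F for char in name):
--         return False
--
--     # Block specific dangerous characters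
--     dangerous_chars_file = ['/', '\\', '..', '>', '<', '|', '*', '$', '&', ';', '`']
--     dangerous_chars_path = ['\\', '..', '>', '<', '|', '*', '$', '&', ';', '`']
--
--     dangerous_chars = []
--     if is_path:
--         dangerous_chars = dangerous_chars_path
--     else:
--         dangerous_chars = dangerous_chars_file
--
--
--     if any(char in name for char in dangerous_chars):
--         return False
--
--     # Block filenames starting with dash or period
--     if name.startswith('-') or name.startswith('.'):
--         return False
--
--     # Ensure filename is valid UTF-8
--     try:
--         name.encode('utf-8').decode('utf-8')
--     except UnicodeError:
--         return False
--
--     return True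
-- ===== SOURCE B (Python) =====
-- def is_name_safe(name, is_path=False):
--     # One forward scan with a previous-char-was-dot flag, instead of several
--     # any() passes plus per-substring searches.
--     if name and name[0] in '-.':
--         return False
--     bad = '\\><|*$&;`' if is_path else '/\\><|*$&;`'
--     prev_dot = False
--     for ch in name:
--         o = ord(ch)
--         if o < 32 or o == 0x7F or ch in bad:
--             return False
--         if ch == '.':
--             if prev_dot:
--                 return False
--             prev_dot = True
--         else:
--             prev_dot = False
--     return True
-- ===== Notes on version B (the rewrite author's own statement) =====
-- stated objective: alternative
-- what changed: Replaces A's several any() passes and per-substring searches (including the double-dot substring scan) with a single forward character scan that carries a previous-char-was-dot flag, after checking the first character up front.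
import Mathlib
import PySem

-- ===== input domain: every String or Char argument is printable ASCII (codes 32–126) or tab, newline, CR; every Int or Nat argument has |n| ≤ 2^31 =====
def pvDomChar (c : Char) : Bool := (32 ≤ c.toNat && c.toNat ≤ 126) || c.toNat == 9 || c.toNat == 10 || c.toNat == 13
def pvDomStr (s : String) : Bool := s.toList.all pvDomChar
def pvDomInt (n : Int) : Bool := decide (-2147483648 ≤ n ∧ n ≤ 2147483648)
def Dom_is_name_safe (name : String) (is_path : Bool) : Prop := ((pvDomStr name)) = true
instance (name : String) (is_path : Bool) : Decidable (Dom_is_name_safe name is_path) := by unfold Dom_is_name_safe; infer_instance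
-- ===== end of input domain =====

-- B replaces A's several any() passes and substring searches by one forward character
-- scan with a previous-char-was-dot flag (alternative decomposition; same asymptotic cost).

-- ===== PORT A =====
def is_name_safe (name : String) (is_path : Bool) : Bool :=
  let s := name.toList
  -- any(ord(char) < 32 or ord(char) == 0x7F for char in name)
  if s.any (fun c => decide (c.toNat < 32) || c.toNat == 0x7F) then false
  else
    -- dangerous_chars_file / dangerous_chars_path as literal substring lists
    let dangerous_chars : List (List Char) :=
      if is_path then [['\\'], ['.', '.'], ['>'], ['<'], ['|'], ['*'], ['$'], ['&'], [';'], ['`']]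
      else [['/'], ['\\'], ['.', '.'], ['>'], ['<'], ['|'], ['*'], ['$'], ['&'], [';'], ['`']]
    -- any(char in name for char in dangerous_chars)
    if dangerous_chars.any (fun sub => PySem.Chars.isIn sub s) then false
    -- name.startswith('-') or name.startswith('.')
    else if PySem.Chars.startswith s ['-'] || PySem.Chars.startswith s ['.'] then false
    -- name.encode('utf-8').decode('utf-8'): never raises here (a Lean Char is a
    -- Unicode scalar value, so no lone surrogates exist on the Lean side)
    else true

-- ===== PORT B =====
-- bad = '\><|*$&;`' if is_path else '/\><|*$&;`'
def altBad (is_path : Bool) : List Char :=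
  if is_path then ['\\', '>', '<', '|', '*', '$', '&', ';', '`']
  else ['/', '\\', '>', '<', '|', '*', '$', '&', ';', '`']

-- the for-loop of Source B: state = prev_dot, early return = returning false
def altScan (bad : List Char) : List Char → Bool → Bool
  | [], _ => true
  | c :: t, prevDot =>
    if decide (c.toNat < 32) || c.toNat == 0x7F || bad.contains c then false
    else if c == '.' then
      if prevDot then false else altScan bad t true
    else altScan bad t false

def is_name_safe_alt (name : String) (is_path : Bool) : Bool :=
  let s := name.toList
  -- if name and name[0] in '-.': return False
  let firstBad := match s with
    | [] => false
    | c :: _ => c == '-' || c == '.'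
  if firstBad then false
  else altScan (altBad is_path) s false

-- ===== PRECONDITION & SPEC =====
def Spec_is_name_safe (name : String) (is_path : Bool) (out : Bool) : Prop := out = is_name_safe_alt name is_path
instance (name : String) (is_path : Bool) (out : Bool) : Decidable (Spec_is_name_safe name is_path out) := by unfold Spec_is_name_safe; infer_instance

-- ===== CLAIM (what is proved, stated in full; the proofs are below) =====
def Claim_equal_is_name_safe : Prop := ∀ (name : String) (is_path : Bool), Dom_is_name_safe name is_path → Spec_is_name_safe name is_path (is_name_safe name is_path)

-- ===== LEMMAS AND PROOFS =====

-- a single dangerous character is a substring iff it is an element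
theorem isIn_singleton (c : Char) (s : List Char) : PySem.Chars.isIn [c] s = s.contains c := by
  rw [Bool.eq_iff_iff, PySem.Chars.isIn_iff_infix, List.contains_eq_mem, decide_eq_true_iff]
  constructor
  · intro h; exact h.mem (by simp)
  · intro h; obtain ⟨l1, l2, rfl⟩ := List.append_of_mem h; exact ⟨l1, l2, by simp⟩

-- the double-dot automaton of Source B, isolated
def ddot : Bool → List Char → Bool
  | _, [] => false
  | prev, c :: t => (prev && (c == '.')) || ddot (c == '.') t

theorem ddot_iff (s : List Char) : ∀ prev : Bool,
    (ddot prev s = true ↔ (prev = true ∧ s.head? = some '.') ∨ ['.', '.'] <:+: s) := by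
  induction s with
  | nil => intro prev; simp [ddot]
  | cons c t ih =>
    intro prev
    have hpre : (['.', '.'] <+: c :: t) ↔ (c = '.' ∧ t.head? = some '.') := by
      constructor
      · rintro ⟨l, hl⟩
        cases t with
        | nil => simp at hl
        | cons d u =>
          injection hl with h1 h2
          injection h2 with h3 h4
          exact ⟨h1.symm, by simp [← h3]⟩
      · rintro ⟨rfl, hh⟩
        cases t with
        | nil => simp at hh
        | cons d u =>
          simp only [List.head?_cons, Option.some.injEq] at hh
          exact ⟨u, by simp [hh]⟩
    rw [List.infix_cons_iff, hpre]
    simp only [ddot, Bool.or_eq_true, Bool.and_eq_true, beq_iff_eq, ih (c == '.'),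
      List.head?_cons, Option.some.injEq]

-- characterisation of B's scan as a conjunction of per-character safety and no-double-dot
theorem altScan_eq (bad : List Char) (s : List Char) : ∀ prev : Bool,
    altScan bad s prev =
      (s.all (fun c => !(decide (c.toNat < 32) || c.toNat == 0x7F || bad.contains c)) && !ddot prev s) := by
  induction s with
  | nil => intro prev; simp [altScan, ddot]
  | cons c t ih =>
    intro prev
    by_cases hb : (decide (c.toNat < 32) || c.toNat == 0x7F || bad.contains c) = true
    · simp only [altScan, hb, if_true, List.all_cons]
      simp
    · by_cases hc : c = '.'
      · cases prev <;>
          · simp [altScan, ddot, hc, ih]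
            try (rw [Bool.eq_iff_iff]; simp at hb ⊢; tauto)
      · have hc' : (c == '.') = false := by simpa using hc
        simp [altScan, ddot, hc', ih]
        rw [Bool.eq_iff_iff]
        simp at hb ⊢
        tauto

theorem notMem_iff (a : Char) (l : List Char) : (∀ x ∈ l, ¬ x = a) ↔ a ∉ l :=
  ⟨fun h hm => h a hm rfl, fun h x hx he => h (he ▸ hx)⟩

theorem singleton_prefix_iff (a : Char) (l : List Char) : [a] <+: l ↔ l.head? = some a := by
  cases l <;> simp [List.cons_prefix_cons, eq_comm]

theorem ddot_eq_false (s : List Char) (prev : Bool) :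
    ddot prev s = false ↔ ¬((prev = true ∧ s.head? = some '.') ∨ ['.', '.'] <:+: s) := by
  rw [← ddot_iff]
  cases h : ddot prev s <;> simp

-- common characterisation of safety
def SafeP (l : List Char) (is_path : Bool) : Prop :=
  (∀ c ∈ l, ¬(c.toNat < 32 ∨ c.toNat = 127 ∨ c ∈ altBad is_path)) ∧
  ¬ ['.', '.'] <:+: l ∧ l.head? ≠ some '-' ∧ l.head? ≠ some '.'

theorem A_iff (name : String) (is_path : Bool) :
    is_name_safe name is_path = true ↔ SafeP name.toList is_path := by
  unfold is_name_safe SafeP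
  cases is_path <;>
    · simp [isIn_singleton, List.contains_eq_mem, PySem.Chars.isIn_eq_false_iff,
        PySem.Chars.startswith_iff, singleton_prefix_iff, not_or, forall_and, altBad]
      simp only [notMem_iff]
      tauto

theorem B_iff (name : String) (is_path : Bool) :
    is_name_safe_alt name is_path = true ↔ SafeP name.toList is_path := by
  unfold is_name_safe_alt SafeP
  simp only [altScan_eq]
  cases hl : name.toList with
  | nil => simp [ddot]
  | cons c t =>
    simp [ddot_eq_false, not_or, forall_and]
    tauto

-- ===== VERDICT (by name: the statement is the Claim_ definition above) =====
theorem is_name_safe_spec : Claim_equal_is_name_safe := by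
  intro name is_path _
  unfold Spec_is_name_safe
  rw [Bool.eq_iff_iff, A_iff, B_iff]
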